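-- pv_equiv track=rewrite | github.com/dlee533/comp1510-programming-methods | Assignments/A1/phone_fun.py | translate_digit
-- ===== SOURCE A (Python) =====
-- def translate_digit(telephone, converted):
--     """
--     return the translated digits
--
--     :param telephone: a string
--     :param converted: a string
--     :precondition: telephone must be a string
--     :precondition: converted must be a string, its length must be smaller
--                     than the length of the telephone
--     :postcondition: check if the digit is a number or a hyphen, if True,
--                     append the same value to the converted
--     :postcondition: check if the digit is an alphabet, depending on which,
--                     append matching number to the converted
--     :postcondition: if the length of the telephone is equal to the converted,
--                     return the converted
--     :postcondition: if the length of the telephone is not equal to the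
--                     len(converted), call itself again
--     :return: the converted number
--
--     >>> translate_digit("000-000-0000", "000-000-000")
--     '000-000-0000'
--     >>> translate_digit("555-GET-FOOD", "")
--     '555-438-3663'
--     >>> translate_digit("ABC-DEF-GHKZ","222")
--     '222-333-4459'
--     """
--     if telephone[len(converted)] in ("0", "1", "2", "3", "4", "5", "6", "7", "8", "9", "-"):
--         converted += telephone[len(converted)]
--     elif telephone[len(converted)] in ("A", "B", "C"):
--         converted += "2"
--     elif telephone[len(converted)] in ("D", "E", "F"):
--         converted += "3"
--     elif telephone[len(converted)] in ("G", "H", "I"):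
--         converted += "4"
--     elif telephone[len(converted)] in ("J", "K", "L"):
--         converted += "5"
--     elif telephone[len(converted)] in ("M", "N", "O"):
--         converted += "6"
--     elif telephone[len(converted)] in ("P", "Q", "R", "S"):
--         converted += "7"
--     elif telephone[len(converted)] in ("T", "U", "V"):
--         converted += "8"
--     elif telephone[len(converted)] in ("W", "X", "Y", "Z"):
--         converted += "9"
--
--     if len(telephone) == len(converted):
--         return converted
--
--     return translate_digit(telephone, converted)
-- ===== SOURCE B (Python) =====
-- _MAP = {**{d: d for d in "0123456789-"},
--         **{letter: digit
--            for digit, letters in {"2": "ABC", "3": "DEF", "4": "GHI",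
--                                   "5": "JKL", "6": "MNO", "7": "PQRS",
--                                   "8": "TUV", "9": "WXYZ"}.items()
--            for letter in letters}}
--
--
-- def translate_digit(telephone, converted):
--     while True:
--         converted += _MAP[telephone[len(converted)]]
--         if len(telephone) == len(converted):
--             return converted
-- ===== Notes on version B (the rewrite author's own statement) =====
-- stated objective: simpler
-- what changed: A's per-character tail recursion with a nine-branch if/elif chain is replaced by an iterative cursor loop over a translation dict built once (digits/hyphen map to themselves, letters to their keypad digit).
import Mathlib
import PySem

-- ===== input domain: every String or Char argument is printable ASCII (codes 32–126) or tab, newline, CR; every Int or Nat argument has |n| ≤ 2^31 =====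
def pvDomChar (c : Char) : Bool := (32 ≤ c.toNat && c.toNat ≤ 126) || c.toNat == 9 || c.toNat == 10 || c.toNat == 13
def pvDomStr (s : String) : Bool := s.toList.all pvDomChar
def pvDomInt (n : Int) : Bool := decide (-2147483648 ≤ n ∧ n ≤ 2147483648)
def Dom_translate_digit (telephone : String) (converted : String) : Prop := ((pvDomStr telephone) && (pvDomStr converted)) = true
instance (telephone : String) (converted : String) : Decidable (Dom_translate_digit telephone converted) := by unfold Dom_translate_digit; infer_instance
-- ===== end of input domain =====

-- B replaces A's per-character tail recursion with its nine-branch if/elif chain by an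
-- iterative cursor loop over a translation dict built once; objective: simpler.

-- ===== PORT A =====
-- one step of A's if/elif chain: 'converted += X' is 'conv ++ X', no branch taken appends nothing
def pvStepA (c : Char) (conv : List Char) : List Char :=
  if c ∈ ['0','1','2','3','4','5','6','7','8','9','-'] then conv ++ [c]
  else if c ∈ ['A','B','C'] then conv ++ ['2']
  else if c ∈ ['D','E','F'] then conv ++ ['3']
  else if c ∈ ['G','H','I'] then conv ++ ['4']
  else if c ∈ ['J','K','L'] then conv ++ ['5']
  else if c ∈ ['M','N','O'] then conv ++ ['6']
  else if c ∈ ['P','Q','R','S'] then conv ++ ['7']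
  else if c ∈ ['T','U','V'] then conv ++ ['8']
  else if c ∈ ['W','X','Y','Z'] then conv ++ ['9']
  else conv

-- A's recursion, fueled: fuel 0 (Python: infinite recursion) and pyGet? = none
-- (Python: IndexError) are exactly the inputs Pre_translate_digit excludes
def pvGoA (t : List Char) (fuel : Nat) (conv : List Char) : List Char :=
  match fuel with
  | 0 => conv
  | fuel + 1 =>
    match PySem.List.pyGet? t ((conv.length : Int)) with
    | none => conv
    | some c =>
      let conv' := pvStepA c conv
      if t.length = conv'.length then conv' else pvGoA t fuel conv'

def translate_digit (telephone : String) (converted : String) : String :=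
  String.mk (pvGoA telephone.toList
    (telephone.toList.length + 1 - converted.toList.length) converted.toList)

-- ===== PORT B =====
-- the dict _MAP of Source B, in its insertion order
def pvTable : List (Char × Char) :=
  [('0','0'),('1','1'),('2','2'),('3','3'),('4','4'),('5','5'),('6','6'),('7','7'),('8','8'),('9','9'),('-','-'),
   ('A','2'),('B','2'),('C','2'),('D','3'),('E','3'),('F','3'),('G','4'),('H','4'),('I','4'),
   ('J','5'),('K','5'),('L','5'),('M','6'),('N','6'),('O','6'),('P','7'),('Q','7'),('R','7'),('S','7'),
   ('T','8'),('U','8'),('V','8'),('W','9'),('X','9'),('Y','9'),('Z','9')]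

-- Source B's 'while True' loop, fueled: pyGet? = none (Python: IndexError) and lookup = none
-- (Python: KeyError) are exactly where Source B raises; fuel 0 is never reached, since every
-- iteration either returns or lengthens converted by one
def pvGoB (t : List Char) (fuel : Nat) (conv : List Char) : List Char :=
  match fuel with
  | 0 => conv
  | fuel + 1 =>
    match PySem.List.pyGet? t ((conv.length : Int)) with
    | none => conv
    | some ch =>
      match pvTable.lookup ch with
      | none => conv
      | some d =>
        let conv' := conv ++ [d]
        if t.length = conv'.length then conv' else pvGoB t fuel conv'

def translate_digit_alt (telephone : String) (converted : String) : String :=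
  String.mk (pvGoB telephone.toList
    (telephone.toList.length + 1 - converted.toList.length) converted.toList)

-- ===== PRECONDITION & SPEC =====
-- the characters A's chain maps: digits, the hyphen, and uppercase letters
def pvMappedChars : List Char :=
  ['0','1','2','3','4','5','6','7','8','9','-',
   'A','B','C','D','E','F','G','H','I','J','K','L','M','N','O','P','Q','R','S','T','U','V','W','X','Y','Z']

-- Pre_ excludes exactly the inputs where the Python A raises: IndexError when
-- len(converted) >= len(telephone), RecursionError when an untranslated character is
-- unmapped (B raises IndexError resp. KeyError there).
def Pre_translate_digit (telephone : String) (converted : String) : Prop :=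
  converted.toList.length < telephone.toList.length ∧
    (telephone.toList.drop converted.toList.length).all (fun c => c ∈ pvMappedChars) = true
instance (telephone : String) (converted : String) : Decidable (Pre_translate_digit telephone converted) := by unfold Pre_translate_digit; infer_instance

def pvWitness_translate_digit : String × String := ("5", "")

def Spec_translate_digit (telephone : String) (converted : String) (out : String) : Prop := out = translate_digit_alt telephone converted
instance (telephone : String) (converted : String) (out : String) : Decidable (Spec_translate_digit telephone converted out) := by unfold Spec_translate_digit; infer_instance

-- ===== CLAIM (what is proved, stated in full; the proofs are below) =====
def Claim_equal_translate_digit : Prop := ∀ (telephone : String) (converted : String), Dom_translate_digit telephone converted → Pre_translate_digit telephone converted → Spec_translate_digit telephone converted (translate_digit telephone converted)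

-- ===== LEMMAS AND PROOFS =====

lemma pvStepA_append (c : Char) (conv : List Char) :
    pvStepA c conv = conv ++ pvStepA c [] := by
  unfold pvStepA; split_ifs <;> simp

lemma pvStepA_eq_lookup : ∀ c ∈ pvMappedChars,
    ∃ d, pvTable.lookup c = some d ∧ pvStepA c [] = [d] := by
  intro c hc; fin_cases hc <;> exact ⟨_, rfl, rfl⟩

lemma pvGoA_eq_pvGoB (fuel : Nat) : ∀ (t conv : List Char),
    (∀ c ∈ t.drop conv.length, c ∈ pvMappedChars) →
    pvGoA t fuel conv = pvGoB t fuel conv := by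
  induction fuel with
  | zero => intro t conv _; rfl
  | succ f ih =>
    intro t conv h2
    unfold pvGoA pvGoB
    rcases hg : PySem.List.pyGet? t ((conv.length : Int)) with _ | c
    · rfl
    · rw [PySem.List.pyGet?_natCast] at hg
      have hlt : conv.length < t.length := (List.getElem?_eq_some_iff.mp hg).1
      have hdrop : t[conv.length] :: t.drop (conv.length + 1) = t.drop conv.length :=
        List.getElem_cons_drop ..
      have hcv : c = t[conv.length] := ((List.getElem?_eq_some_iff.mp hg).2).symm
      have hmem : c ∈ pvMappedChars := by
        apply h2; rw [← hdrop, hcv]; exact List.mem_cons_self ..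
      obtain ⟨d, hlook, hstep⟩ := pvStepA_eq_lookup c hmem
      simp only [hlook, pvStepA_append c conv, hstep]
      by_cases hdone : t.length = (conv ++ [d]).length
      · rw [if_pos hdone, if_pos hdone]
      · rw [if_neg hdone, if_neg hdone]
        apply ih
        intro c' hc'
        apply h2
        rw [← hdrop]
        simp only [List.length_append, List.length_cons, List.length_nil] at hc'
        exact List.mem_cons_of_mem _ hc'

-- ===== VERDICT (by name: the statement is the Claim_ definition above) =====
theorem translate_digit_spec : Claim_equal_translate_digit := by
  intro telephone converted _ hpre
  have h2 : ∀ c ∈ telephone.toList.drop converted.toList.length, c ∈ pvMappedChars := by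
    simpa using hpre.2
  unfold Spec_translate_digit translate_digit translate_digit_alt
  exact congrArg String.mk (pvGoA_eq_pvGoB _ telephone.toList converted.toList h2)
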